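-- pv_equiv track=rewrite | github.com/ckf42/AOC | 2020/day24.py | parseInst
-- ===== SOURCE A (Python) =====
-- def parseInst(inst: str) -> tuple[str, ...]:
--     ptr = 0
--     instList: list[str] = list()
--     while ptr < len(inst):
--         if inst[ptr] in 'ew':
--             instList.append(inst[ptr])
--             ptr += 1
--         else:
--             instList.append(inst[ptr:ptr + 2])
--             ptr += 2
--     return tuple(instList)
-- ===== SOURCE B (Python) =====
-- def parseInst(inst: str) -> tuple[str, ...]:
--     res = []
--     pending = ''
--     for ch in inst:
--         if pending:
--             res.append(pending + ch)
--             pending = ''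
--         elif ch in 'ew':
--             res.append(ch)
--         else:
--             pending = ch
--     if pending:
--         res.append(pending)
--     return tuple(res)
-- ===== Notes on version B (the rewrite author's own statement) =====
-- stated objective: faster
-- what changed: Replaced the pointer-and-slice while loop (advancing by 1 or 2 and slicing inst[ptr:ptr+2]) with a single for-each-character state machine that keeps a pending prefix character and never slices or indexes.
import Mathlib
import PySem

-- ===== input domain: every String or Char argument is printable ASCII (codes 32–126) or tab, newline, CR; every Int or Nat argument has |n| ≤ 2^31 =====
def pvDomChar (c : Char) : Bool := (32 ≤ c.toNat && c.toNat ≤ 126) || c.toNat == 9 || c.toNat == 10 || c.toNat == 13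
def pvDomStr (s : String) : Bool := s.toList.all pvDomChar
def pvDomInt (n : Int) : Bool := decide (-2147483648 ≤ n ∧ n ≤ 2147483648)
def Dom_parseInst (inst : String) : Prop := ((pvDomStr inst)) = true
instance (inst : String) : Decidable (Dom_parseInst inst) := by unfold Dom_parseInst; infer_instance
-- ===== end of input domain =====

-- B replaces A's pointer-and-slice while loop by a per-character state machine with a pending prefix char (different decomposition; a timing run measured B faster by a constant factor: no slicing or indexing).


-- ===== PORT A =====
-- while loop over the suffix at ptr: inst[ptr] = c, inst[ptr:ptr+2] = c :: rest.take 1,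
-- ptr += 1 keeps rest, ptr += 2 keeps rest.drop 1 (exact: ptr is always in range here)
def parseInstGo : List Char → List String
  | [] => []
  | c :: rest =>
    if c = 'e' ∨ c = 'w' then String.ofList [c] :: parseInstGo rest
    else String.ofList (c :: rest.take 1) :: parseInstGo (rest.drop 1)
  termination_by l => l.length
  decreasing_by
    all_goals simp

def parseInst (inst : String) : List String := parseInstGo inst.toList

-- ===== PORT B =====
-- state: (emitted tokens, pending prefix char if any); '' as pending → none
def parseInstAltStep (s : List String × Option Char) (ch : Char) : List String × Option Char :=
  match s.2 with
  | some p => (s.1 ++ [String.ofList [p, ch]], none)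
  | none =>
    if ch = 'e' ∨ ch = 'w' then (s.1 ++ [String.ofList [ch]], none)
    else (s.1, some ch)

def parseInstAltFlush (s : List String × Option Char) : List String :=
  match s.2 with
  | some p => s.1 ++ [String.ofList [p]]
  | none => s.1

def parseInst_alt (inst : String) : List String :=
  parseInstAltFlush (inst.toList.foldl parseInstAltStep ([], none))

-- ===== PRECONDITION & SPEC =====
def Spec_parseInst (inst : String) (out : List String) : Prop := out = parseInst_alt inst
instance (inst : String) (out : List String) : Decidable (Spec_parseInst inst out) := by unfold Spec_parseInst; infer_instance

-- ===== CLAIM (what is proved, stated in full; the proofs are below) =====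
def Claim_equal_parseInst : Prop := ∀ (inst : String), Dom_parseInst inst → Spec_parseInst inst (parseInst inst)

-- ===== LEMMAS AND PROOFS =====
-- what A computes after seeing a non-'ew' char p with suffix l still unread
def parsePend (p : Char) : List Char → List String
  | [] => [String.ofList [p]]
  | c :: rest => String.ofList [p, c] :: parseInstGo rest

theorem parseInst_loop_eq (l : List Char) :
    (∀ acc : List String,
        parseInstAltFlush (l.foldl parseInstAltStep (acc, none)) = acc ++ parseInstGo l) ∧
    (∀ (acc : List String) (p : Char),
        parseInstAltFlush (l.foldl parseInstAltStep (acc, some p)) = acc ++ parsePend p l) := by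
  induction l with
  | nil => exact ⟨fun acc => by simp [parseInstAltFlush, parseInstGo],
                  fun acc p => by simp [parseInstAltFlush, parsePend]⟩
  | cons c rest ih =>
    constructor
    · intro acc
      by_cases hc : c = 'e' ∨ c = 'w'
      · simp only [List.foldl_cons, parseInstAltStep, if_pos hc]
        rw [ih.1]
        simp [parseInstGo, if_pos hc]
      · simp only [List.foldl_cons, parseInstAltStep, if_neg hc]
        rw [ih.2]
        cases rest with
        | nil => simp [parsePend, parseInstGo, hc]
        | cons c2 rest2 => simp [parsePend, parseInstGo, hc]
    · intro acc p
      simp only [List.foldl_cons, parseInstAltStep]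
      rw [ih.1]
      simp [parsePend]

-- ===== VERDICT (by name: the statement is the Claim_ definition above) =====
theorem parseInst_spec : Claim_equal_parseInst := by
  intro inst _
  unfold Spec_parseInst parseInst parseInst_alt
  rw [(parseInst_loop_eq inst.toList).1 []]
  simp
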